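-- pv_equiv track=rewrite | github.com/iownthegame/AdventofCode2019 | day4/sol.py | part2
-- ===== SOURCE A (Python) =====
-- import collections
--
-- def part2(start, end):
--     cnt = 0
--     for num in range(start, end+1):
--         string = str(num)
--         nums = [int(s) for s in string]
--         counter = collections.Counter(string)
--         if not any([val > 1 for val in counter.values()]):
--             continue
--         diff = [x - y for x, y in zip(nums[1:], nums)]
--         if any([d < 0 for d in diff]):
--             continue
--         # the two adjacent matching digits are not part of a larger group of matching digits.
--         min_dup_val = float('inf')
--         for _key, val in counter.items():
--             if val > 1:
--                 min_dup_val = min(min_dup_val, val)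
--         if min_dup_val != 2:
--             continue
--         cnt += 1
--     return cnt
-- ===== SOURCE B (Python) =====
-- def part2(start, end):
--     cnt = 0
--     for num in range(start, end + 1):
--         s = str(num)
--         ok = True
--         has_pair = False
--         run = 1
--         for i in range(1, len(s)):
--             if s[i] < s[i - 1]:
--                 ok = False
--                 break
--             if s[i] == s[i - 1]:
--                 run += 1
--             else:
--                 if run == 2:
--                     has_pair = True
--                 run = 1
--         if ok:
--             if run == 2:
--                 has_pair = True
--             if has_pair:
--                 cnt += 1
--     return cnt
-- ===== Notes on version B (the rewrite author's own statement) =====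
-- stated objective: faster
-- what changed: B replaces A's per-number work (building a digit list with int(), a Counter, a zip-based diff list, and a min-over-duplicate-counts pass) by a single left-to-right scan of the digit string that tracks the current run length, checks non-decreasingness and detects a run of length exactly two in one pass.
import Mathlib
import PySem

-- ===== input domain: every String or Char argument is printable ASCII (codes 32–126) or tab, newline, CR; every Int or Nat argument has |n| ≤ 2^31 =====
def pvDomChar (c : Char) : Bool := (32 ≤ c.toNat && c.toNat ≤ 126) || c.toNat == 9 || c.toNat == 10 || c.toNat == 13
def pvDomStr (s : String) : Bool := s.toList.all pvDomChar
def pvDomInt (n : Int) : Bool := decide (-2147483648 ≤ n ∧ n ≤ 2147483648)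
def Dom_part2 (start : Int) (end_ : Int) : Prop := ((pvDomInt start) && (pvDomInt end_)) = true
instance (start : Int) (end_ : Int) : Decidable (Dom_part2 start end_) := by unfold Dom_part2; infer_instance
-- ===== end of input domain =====

-- B replaces A's per-number Counter/zip/min bookkeeping by one left-to-right scan of the digit string
-- tracking the current run length (same count, measurably faster by a constant factor).

-- ===== PORT A =====
-- loop body of A's 'for num in range(start, end+1)' loop
def stepA (cnt : Int) (num : Int) : Int :=
  let string := PySem.Int.toChars num
  -- [int(s) for s in string]: exact on digit chars; on '-' (negative num) Python raises ValueError — excluded by Pre_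
  let nums := string.map (fun c => (PySem.Int.ofChars? [c]).getD 0)
  let counter := PySem.Dict.counter string
  if !((counter.values.map (fun v => decide (1 < v))).any id) then cnt
  else
    let diff := ((PySem.List.slice nums (some 1) none).zip nums).map (fun p => p.1 - p.2)
    if (diff.map (fun d => decide (d < 0))).any id then cnt
    else
      -- min_dup_val: float('inf') modelled as none; 'min_dup_val != 2' is 'mdv ≠ some 2' (inf ≠ 2) — exact
      let mdv := counter.items.foldl
        (fun m kv => if 1 < kv.2 then
            some (match m with | none => kv.2 | some x => min x kv.2)
          else m) (none : Option Int)
      if mdv ≠ some 2 then cnt else cnt + 1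

def part2 (start : Int) (end_ : Int) : Int :=
  (PySem.List.pyRange start (end_ + 1) 1).foldl stepA 0

-- ===== PORT B =====
-- B's inner loop 'for i in range(1, len(s))' with prev = s[i-1], run, has_pair; 'break' = returning false,
-- the trailing 'if run == 2' check is the [] base case
def goB (prev : Char) (run : Int) (hasPair : Bool) : List Char → Bool
  | [] => hasPair || (run == 2)
  | c :: rest =>
    if c < prev then false
    else if c == prev then goB c (run + 1) hasPair rest
    else goB c 1 (hasPair || (run == 2)) rest

-- loop body of B's outer loop (empty string: B's scan never fires, not counted)
def stepB (cnt : Int) (num : Int) : Int :=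
  match PySem.Int.toChars num with
  | [] => cnt
  | c :: rest => if goB c 1 false rest then cnt + 1 else cnt

def part2_alt (start : Int) (end_ : Int) : Int :=
  (PySem.List.pyRange start (end_ + 1) 1).foldl stepB 0

-- ===== PRECONDITION & SPEC =====
-- Pre_ excludes exactly the inputs on which A raises ValueError: a nonempty range starting below 0
-- (str(num) then contains '-', and int('-') raises).
def Pre_part2 (start : Int) (end_ : Int) : Prop := 0 ≤ start ∨ end_ < start
instance (start : Int) (end_ : Int) : Decidable (Pre_part2 start end_) := by unfold Pre_part2; infer_instance
def pvWitness_part2 : Int × Int := (100, 135)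

def Spec_part2 (start : Int) (end_ : Int) (out : Int) : Prop := out = part2_alt start end_
instance (start : Int) (end_ : Int) (out : Int) : Decidable (Spec_part2 start end_ out) := by unfold Spec_part2; infer_instance

-- ===== CLAIM (what is proved, stated in full; the proofs are below) =====
def Claim_equal_part2 : Prop := ∀ (start : Int) (end_ : Int), Dom_part2 start end_ → Pre_part2 start end_ → Spec_part2 start end_ (part2 start end_)
-- ===== LEMMAS AND PROOFS =====

lemma char_eq_of_toNat (c : Char) (k : Nat) (h : c.toNat = k) : c = Char.ofNat k := by
  rw [← h]; exact (Char.ofNat_toNat c).symm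

lemma char_lt_iff (a b : Char) : a < b ↔ a.toNat < b.toNat := by
  simp [Char.lt_def]; exact gt_iff_lt

-- int(c) for a digit character
lemma dval_digit (c : Char) (h : c.isDigit = true) :
    (PySem.Int.ofChars? [c]).getD 0 = (c.toNat : Int) - 48 := by
  have hb : 48 ≤ c.toNat ∧ c.toNat ≤ 57 := by
    simp [Char.isDigit] at h; exact ⟨h.1, h.2⟩
  have h10 : c.toNat = 48 ∨ c.toNat = 49 ∨ c.toNat = 50 ∨ c.toNat = 51 ∨ c.toNat = 52 ∨
      c.toNat = 53 ∨ c.toNat = 54 ∨ c.toNat = 55 ∨ c.toNat = 56 ∨ c.toNat = 57 := by omega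
  rcases h10 with hk|hk|hk|hk|hk|hk|hk|hk|hk|hk <;>
    rw [char_eq_of_toNat c _ hk] <;> decide

lemma digits_toChars (num : Int) (h : 0 ≤ num) : ∀ c ∈ PySem.Int.toChars num, c.isDigit = true := by
  intro c hc
  unfold PySem.Int.toChars at hc
  rw [if_neg (by omega)] at hc
  exact Nat.isDigit_of_mem_toDigits (by norm_num) (by norm_num) hc

-- "non-decreasing from a": the sortedness check both programs perform, in B's orientation
def ndB : Char → List Char → Bool
  | _, [] => true
  | a, b :: l => !(b < a) && ndB b l

lemma ndB_le (a : Char) (l : List Char) (h : ndB a l = true) : ∀ x ∈ l, a ≤ x := by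
  induction l generalizing a with
  | nil => simp
  | cons b l ih =>
    simp only [ndB, Bool.and_eq_true, Bool.not_eq_true'] at h
    obtain ⟨h1, h2⟩ := h
    have hab : a ≤ b := not_lt.mp (by simpa using h1)
    intro x hx
    rcases List.mem_cons.mp hx with rfl | hx
    · exact hab
    · exact le_trans hab (ih b h2 x hx)

lemma ndB_count_zero (p c : Char) (rest : List Char) (hc : ndB c rest = true) (hp : p < c) :
    (c :: rest).count p = 0 := by
  rw [List.count_eq_zero]
  intro hmem
  rcases List.mem_cons.mp hmem with rfl | hmem
  · exact absurd hp (lt_irrefl p)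
  · exact absurd (lt_of_lt_of_le hp (ndB_le c rest hc p hmem)) (lt_irrefl p)

lemma goB_iff (l : List Char) (prev : Char) (run : Int) (hp : Bool) :
    goB prev run hp l = true ↔
      (ndB prev l = true ∧
        (hp = true ∨ run + (l.count prev : Int) = 2 ∨ ∃ c ∈ l, c ≠ prev ∧ l.count c = 2)) := by
  induction l generalizing prev run hp with
  | nil =>
    simp [goB, ndB]
  | cons c rest ih =>
    by_cases hlt : c < prev
    · simp [goB, hlt, ndB]
    · by_cases heq : c = prev
      · subst heq
        rw [show goB c run hp (c :: rest) = goB c (run + 1) hp rest by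
          simp [goB]]
        rw [ih]
        have hndb : ndB c (c :: rest) = ndB c rest := by simp [ndB]
        have hcount : ((c :: rest).count c : Int) = (rest.count c : Int) + 1 := by
          rw [List.count_cons_self]; push_cast; ring
        rw [hndb, hcount]
        constructor
        · rintro ⟨hnd, hc⟩
          refine ⟨hnd, ?_⟩
          rcases hc with hc | hc | ⟨x, hx, hne, hcx⟩
          · exact Or.inl hc
          · exact Or.inr (Or.inl (by omega))
          · exact Or.inr (Or.inr ⟨x, List.mem_cons_of_mem _ hx, hne,
              by rwa [List.count_cons_of_ne (fun h => hne h.symm)]⟩)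
        · rintro ⟨hnd, hc⟩
          refine ⟨hnd, ?_⟩
          rcases hc with hc | hc | ⟨x, hx, hne, hcx⟩
          · exact Or.inl hc
          · exact Or.inr (Or.inl (by omega))
          · rcases List.mem_cons.mp hx with rfl | hx
            · exact absurd rfl hne
            · exact Or.inr (Or.inr ⟨x, hx, hne,
                by rwa [List.count_cons_of_ne (fun h => hne h.symm)] at hcx⟩)
      · have hgt : prev < c := lt_of_le_of_ne (not_lt.mp hlt) (fun h => heq h.symm)
        rw [show goB prev run hp (c :: rest) = goB c 1 (hp || (run == 2)) rest by
          simp [goB, hlt, heq]]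
        rw [ih]
        have hndb : ndB prev (c :: rest) = ndB c rest := by
          simp [ndB, not_lt.mpr (le_of_lt hgt)]
        rw [hndb]
        by_cases hnd : ndB c rest = true
        · have hzero : ((c :: rest).count prev : Int) = 0 := by
            rw [ndB_count_zero prev c rest hnd hgt]; rfl
          have hnotmem : prev ∉ c :: rest := by
            rw [← List.count_eq_zero (l := c :: rest) (a := prev)]
            exact_mod_cast hzero
          simp only [hnd, true_and, hzero, Bool.or_eq_true, beq_iff_eq]
          constructor
          · rintro (⟨hc | hc⟩ | hc | ⟨x, hx, hne, hcx⟩)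
            · exact Or.inl hc
            · exact Or.inr (Or.inl (by omega))
            · exact Or.inr (Or.inr ⟨c, List.mem_cons_self, fun h => hnotmem (h ▸ List.mem_cons_self), by
                rw [List.count_cons_self]; omega⟩)
            · refine Or.inr (Or.inr ⟨x, List.mem_cons_of_mem _ hx,
                fun h => hnotmem (h ▸ List.mem_cons_of_mem _ hx), ?_⟩)
              rwa [List.count_cons_of_ne (fun h => hne h.symm)]
          · rintro (hc | hc | ⟨x, hx, hne, hcx⟩)
            · exact Or.inl (Or.inl hc)
            · exact Or.inl (Or.inr (by omega))
            · rcases List.mem_cons.mp hx with rfl | hx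
              · rw [List.count_cons_self] at hcx
                exact Or.inr (Or.inl (by omega))
              · by_cases hxc : x = c
                · subst hxc
                  rw [List.count_cons_self] at hcx
                  exact Or.inr (Or.inl (by omega))
                · rw [List.count_cons_of_ne (fun h => hxc h.symm)] at hcx
                  exact Or.inr (Or.inr ⟨x, hx, hxc, hcx⟩)
        · simp [hnd]

-- A's min-over-duplicate-counts fold hits 2 iff some count is exactly 2
lemma minfold_two (items : List (Char × Int)) (acc : Option Int)
    (hacc : ∀ k, acc = some k → 2 ≤ k) :
    items.foldl
        (fun m kv => if 1 < kv.2 then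
            some (match m with | none => kv.2 | some x => min x kv.2)
          else m) acc = some 2
      ↔ (acc = some 2 ∨ ∃ kv ∈ items, kv.2 = 2) := by
  induction items generalizing acc with
  | nil => simp
  | cons kv rest ih =>
    simp only [List.foldl_cons]
    by_cases h1 : 1 < kv.2
    · rw [if_pos h1]
      have h2 : (2 : Int) ≤ kv.2 := by omega
      cases hacc2 : acc with
      | none =>
        rw [ih _ (by intro k hk; simp only [Option.some.injEq] at hk; omega)]
        simp only [Option.some.injEq, List.mem_cons]
        constructor
        · rintro (hc | ⟨x, hx, hcx⟩)
          · exact Or.inr ⟨kv, Or.inl rfl, hc⟩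
          · exact Or.inr ⟨x, Or.inr hx, hcx⟩
        · rintro (hc | ⟨x, hx | hx, hcx⟩)
          · simp at hc
          · subst hx; exact Or.inl hcx
          · exact Or.inr ⟨x, hx, hcx⟩
      | some x =>
        have hx2 := hacc x hacc2
        have hmin : (min x kv.2 = 2) ↔ (x = 2 ∨ kv.2 = 2) := by
          rcases le_total x kv.2 with hle | hle
          · rw [min_eq_left hle]; omega
          · rw [min_eq_right hle]; omega
        rw [ih _ (by intro k hk
                     simp only [Option.some.injEq] at hk
                     exact hk ▸ le_min hx2 h2)]
        simp only [Option.some.injEq, List.mem_cons, hmin]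
        constructor
        · rintro (hc | ⟨y, hy, hcy⟩)
          · rcases hc with hc | hc
            · exact Or.inl hc
            · exact Or.inr ⟨kv, Or.inl rfl, hc⟩
          · exact Or.inr ⟨y, Or.inr hy, hcy⟩
        · rintro (hc | ⟨y, hy | hy, hcy⟩)
          · exact Or.inl (Or.inl hc)
          · subst hy; exact Or.inl (Or.inr hcy)
          · exact Or.inr ⟨y, hy, hcy⟩
    · rw [if_neg h1, ih _ hacc]
      simp only [List.mem_cons]
      constructor
      · rintro (hc | ⟨x, hx, hcx⟩)
        · exact Or.inl hc
        · exact Or.inr ⟨x, Or.inr hx, hcx⟩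
      · rintro (hc | ⟨x, hx | hx, hcx⟩)
        · exact Or.inl hc
        · subst hx; omega
        · exact Or.inr ⟨x, hx, hcx⟩

-- A's diff/any descent test is the complement of ndB, through a strictly monotone digit valuation
lemma desc_iff (l : List Char) (c : Char) (f : Char → Int)
    (hmono : ∀ a ∈ c :: l, ∀ b ∈ c :: l, (f b < f a ↔ b < a)) :
    (((((c :: l).map f).tail.zip ((c :: l).map f)).map (fun p => p.1 - p.2)).map
        (fun d => decide (d < 0))).any id = false ↔ ndB c l = true := by
  induction l generalizing c with
  | nil => simp [ndB]
  | cons d rest ih =>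
    have step : ((((c :: d :: rest).map f).tail.zip ((c :: d :: rest).map f)).map
          (fun p => p.1 - p.2)).map (fun dd => decide (dd < 0)) =
        decide (f d - f c < 0) ::
          ((((d :: rest).map f).tail.zip ((d :: rest).map f)).map
            (fun p => p.1 - p.2)).map (fun dd => decide (dd < 0)) := by
      simp [List.zip]
    rw [step]
    simp only [List.any_cons, Bool.or_eq_false_iff, decide_eq_false_iff_not, not_lt, id]
    have hsub : ∀ a ∈ d :: rest, ∀ b ∈ d :: rest, (f b < f a ↔ b < a) := by
      intro a ha b hb
      exact hmono a (List.mem_cons_of_mem _ ha) b (List.mem_cons_of_mem _ hb)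
    rw [ih d hsub]
    have hdc : (0 ≤ f d - f c) ↔ ¬ d < c := by
      rw [← not_lt, not_iff_not]
      constructor
      · intro hh
        exact (hmono c List.mem_cons_self d (List.mem_cons_of_mem _ List.mem_cons_self)).mp
          (by omega)
      · intro hh
        have := (hmono c List.mem_cons_self d
          (List.mem_cons_of_mem _ List.mem_cons_self)).mpr hh
        omega
    constructor
    · rintro ⟨h1, h2⟩
      simp [ndB, hdc.mp h1, h2]
    · intro hh
      simp only [ndB, Bool.and_eq_true, Bool.not_eq_true'] at hh
      exact ⟨hdc.mpr (by simpa using hh.1), hh.2⟩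

lemma exists_count_cons (c : Char) (rest : List Char) :
    ((1 : Int) + (rest.count c : Int) = 2 ∨ ∃ x ∈ rest, x ≠ c ∧ rest.count x = 2) ↔
      ∃ x ∈ c :: rest, (c :: rest).count x = 2 := by
  constructor
  · rintro (hc | ⟨x, hx, hne, hcx⟩)
    · exact ⟨c, List.mem_cons_self, by rw [List.count_cons_self]; omega⟩
    · exact ⟨x, List.mem_cons_of_mem _ hx, by
        rw [List.count_cons_of_ne (fun h => hne h.symm)]; exact hcx⟩
  · rintro ⟨x, hx, hcx⟩
    by_cases hxc : x = c
    · subst hxc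
      rw [List.count_cons_self] at hcx
      exact Or.inl (by omega)
    · rcases List.mem_cons.mp hx with rfl | hx
      · exact absurd rfl hxc
      · rw [List.count_cons_of_ne (fun h => hxc h.symm)] at hcx
        exact Or.inr ⟨x, hx, hxc, hcx⟩

lemma step_eq (cnt num : Int) (h : 0 ≤ num) : stepA cnt num = stepB cnt num := by
  have hdig := digits_toChars num h
  unfold stepA stepB
  cases hl : PySem.Int.toChars num with
  | nil => rfl
  | cons c rest =>
    rw [hl] at hdig
    have hvals : (PySem.Dict.counter (c :: rest)).values =
        (PySem.Set.ofList (c :: rest)).map (fun k => ((c :: rest).count k : Int)) := by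
      show (PySem.Dict.counter (c :: rest)).items.map (·.2) = _
      rw [PySem.Dict.items_counter]
      simp [List.map_map, Function.comp]
    have ha1 : (((PySem.Dict.counter (c :: rest)).values.map
          (fun v => decide (1 < v))).any id = true) ↔
        ∃ x ∈ c :: rest, 1 < (c :: rest).count x := by
      rw [hvals]
      simp only [List.any_map, List.any_eq_true, Function.comp, id_eq, decide_eq_true_eq,
        PySem.Set.mem_ofList]
      constructor
      · rintro ⟨x, hx, hcx⟩; exact ⟨x, hx, by simpa using hcx⟩
      · rintro ⟨x, hx, hcx⟩; exact ⟨x, hx, by simpa using hcx⟩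
    have hmono : ∀ a ∈ c :: rest, ∀ b ∈ c :: rest,
        ((fun ch => (PySem.Int.ofChars? [ch]).getD 0) b <
          (fun ch => (PySem.Int.ofChars? [ch]).getD 0) a ↔ b < a) := by
      intro a ha b hb
      simp only
      rw [dval_digit a (hdig a ha), dval_digit b (hdig b hb), char_lt_iff]
      omega
    have hdesc := desc_iff rest c (fun ch => (PySem.Int.ofChars? [ch]).getD 0) hmono
    have hmdv : ((PySem.Dict.counter (c :: rest)).items.foldl
          (fun m kv => if 1 < kv.2 then
              some (match m with | none => kv.2 | some x => min x kv.2)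
            else m) (none : Option Int) = some 2) ↔
        ∃ x ∈ c :: rest, (c :: rest).count x = 2 := by
      rw [minfold_two _ none (by simp)]
      simp only [PySem.Dict.items_counter, List.mem_map, PySem.Set.mem_ofList]
      constructor
      · rintro (hc | ⟨kv, ⟨x, hx, rfl⟩, hcx⟩)
        · simp at hc
        · exact ⟨x, hx, by dsimp only at hcx; exact_mod_cast hcx⟩
      · rintro ⟨x, hx, hcx⟩
        exact Or.inr ⟨(x, ((c :: rest).count x : Int)), ⟨x, hx, rfl⟩, by dsimp only; exact_mod_cast hcx⟩
    have hgo : (goB c 1 false rest = true) ↔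
        (ndB c rest = true ∧ ∃ x ∈ c :: rest, (c :: rest).count x = 2) := by
      rw [goB_iff]
      simp only [Bool.false_eq_true, false_or]
      rw [← exists_count_cons]
    dsimp only
    rw [PySem.List.slice_from_one]
    by_cases hnd : ndB c rest = true
    · by_cases hex : ∃ x ∈ c :: rest, (c :: rest).count x = 2
      · have e1 : (((PySem.Dict.counter (c :: rest)).values.map
            (fun v => decide (1 < v))).any id) = true := by
          rw [ha1]
          obtain ⟨x, hx, hcx⟩ := hex
          exact ⟨x, hx, by omega⟩
        have e2 := hdesc.mpr hnd
        have e3 := hmdv.mpr hex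
        have e4 := hgo.mpr ⟨hnd, hex⟩
        simp only [e1, e2, e3, e4]
        simp
      · have e3 : ¬ ((PySem.Dict.counter (c :: rest)).items.foldl
            (fun m kv => if 1 < kv.2 then
                some (match m with | none => kv.2 | some x => min x kv.2)
              else m) (none : Option Int) = some 2) := fun hh => hex (hmdv.mp hh)
        have e4 : goB c 1 false rest = false := by
          rw [Bool.eq_false_iff]
          intro hh
          exact hex (hgo.mp hh).2
        have e2 := hdesc.mpr hnd
        by_cases e1 : (((PySem.Dict.counter (c :: rest)).values.map
            (fun v => decide (1 < v))).any id) = true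
        · simp only [e1, e2, e4, ne_eq, e3]
          simp
        · simp only [Bool.eq_false_iff.mpr e1, e4]
          simp
    · have e2 : (((((c :: rest).map fun ch => (PySem.Int.ofChars? [ch]).getD 0).tail.zip
            ((c :: rest).map fun ch => (PySem.Int.ofChars? [ch]).getD 0)).map
            (fun p => p.1 - p.2)).map (fun d => decide (d < 0))).any id = true := by
        cases hb : (((((c :: rest).map fun ch => (PySem.Int.ofChars? [ch]).getD 0).tail.zip
            ((c :: rest).map fun ch => (PySem.Int.ofChars? [ch]).getD 0)).map
            (fun p => p.1 - p.2)).map (fun d => decide (d < 0))).any id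
        · exact absurd (hdesc.mp hb) hnd
        · rfl
      have e4 : goB c 1 false rest = false := by
        rw [Bool.eq_false_iff]
        intro hh
        exact hnd (hgo.mp hh).1
      by_cases e1 : (((PySem.Dict.counter (c :: rest)).values.map
          (fun v => decide (1 < v))).any id) = true
      · simp only [e1, e2, e4]
        simp
      · simp only [Bool.eq_false_iff.mpr e1, e4]
        simp

-- ===== VERDICT (by name: the statement is the Claim_ definition above) =====
theorem part2_spec : Claim_equal_part2 := by
  intro start end_ _ hpre
  unfold Spec_part2 part2 part2_alt
  rcases hpre with hpre | hpre
  · exact PySem.List.foldl_congr_mem _ _ _ _ (fun acc x hx => by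
      have hx' := (PySem.List.mem_pyRange_one).mp hx
      exact step_eq acc x (by omega))
  · rw [PySem.List.pyRange_one_eq_nil (by omega)]
    rfl
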